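-- pv_equiv track=rewrite | github.com/evancheng1006/tic-tac-toe-AI | v2/states.py | get_best_state
-- ===== SOURCE A (Python) =====
-- def get_best_state(next_player, next_boards_status, next_moves):
--     best_state = 'invalid'
--     strategy = []
--     if next_player == 1:
--         if 'player_one_always_win' in next_boards_status:
--             best_state = 'player_one_always_win'
--         elif 'tie' in next_boards_status:
--             best_state = 'tie'
--         else:
--             best_state = 'player_two_always_win'
--     elif next_player == 2:
--         if 'player_two_always_win' in next_boards_status:
--             best_state = 'player_two_always_win'
--         elif 'tie' in next_boards_status:
--             best_state = 'tie'
--         else: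
--             best_state = 'player_one_always_win'
--     strategy = [next_moves[i] for i in range(len(next_moves)) if next_boards_status[i] == best_state]
--     return best_state, strategy
-- ===== SOURCE B (Python) =====
-- def get_best_state(next_player, next_boards_status, next_moves):
--     # Group moves by status once, then pick the status scoring highest for next_player.
--     buckets = {}
--     for s, m in zip(next_boards_status, next_moves):
--         buckets.setdefault(s, []).append(m)
--     if next_player == 1:
--         score = {'player_one_always_win': 2, 'tie': 1, 'player_two_always_win': 0}
--         best_state, best_score = 'player_two_always_win', 0
--     elif next_player == 2:
--         score = {'player_two_always_win': 2, 'tie': 1, 'player_one_always_win': 0}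
--         best_state, best_score = 'player_one_always_win', 0
--     else:
--         return 'invalid', buckets.get('invalid', [])
--     for s in next_boards_status:
--         sc = score.get(s, -1)
--         if sc > best_score:
--             best_state, best_score = s, sc
--     return best_state, buckets.get(best_state, [])
-- ===== Notes on version B (the rewrite author's own statement) =====
-- stated objective: alternative
-- what changed: Instead of A's three hard-coded membership tests followed by an index-comprehension filter, B groups moves into status buckets in one pass and selects the best state by a single max-score scan with an accumulator, returning the bucket for the winner.
import Mathlib
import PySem

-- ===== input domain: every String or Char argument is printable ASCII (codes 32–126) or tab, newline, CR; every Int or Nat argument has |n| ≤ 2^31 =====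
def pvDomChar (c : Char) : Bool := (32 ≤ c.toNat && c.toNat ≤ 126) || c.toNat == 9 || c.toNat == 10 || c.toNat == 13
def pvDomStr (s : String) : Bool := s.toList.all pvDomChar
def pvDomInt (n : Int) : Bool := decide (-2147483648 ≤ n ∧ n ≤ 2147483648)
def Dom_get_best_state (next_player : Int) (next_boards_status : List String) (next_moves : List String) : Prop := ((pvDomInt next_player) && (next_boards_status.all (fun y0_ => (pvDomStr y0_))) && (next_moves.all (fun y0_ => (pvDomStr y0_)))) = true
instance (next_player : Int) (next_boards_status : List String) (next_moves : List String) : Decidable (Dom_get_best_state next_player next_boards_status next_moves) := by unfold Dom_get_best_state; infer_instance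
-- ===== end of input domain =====

-- B groups moves into status buckets in one pass and picks the best state by a
-- single max-score scan, instead of A's membership-test ladder plus index filter
-- (objective: alternative, same cost).

-- ===== PORT A =====
def get_best_state (next_player : Int) (next_boards_status : List String) (next_moves : List String) : String × List String :=
  let best_state : String :=
    if next_player == 1 then
      if next_boards_status.contains "player_one_always_win" then "player_one_always_win"
      else if next_boards_status.contains "tie" then "tie"
      else "player_two_always_win"
    else if next_player == 2 then
      if next_boards_status.contains "player_two_always_win" then "player_two_always_win"
      else if next_boards_status.contains "tie" then "tie"
      else "player_one_always_win"
    else "invalid"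
  -- comprehension over range(len(next_moves)); pyGetD's default is only reached outside Pre_
  let strategy : List String :=
    (PySem.List.pyRange 0 (next_moves.length : Int) 1).foldl
      (fun acc i =>
        if PySem.List.pyGetD next_boards_status i "" == best_state then
          acc ++ [PySem.List.pyGetD next_moves i ""]
        else acc) []
  (best_state, strategy)

-- ===== PORT B =====
def get_best_state_alt (next_player : Int) (next_boards_status : List String) (next_moves : List String) : String × List String :=
  -- buckets.setdefault(s, []).append(m) == modify s [] (· ++ [m])
  let buckets : PySem.Dict String (List String) :=
    (next_boards_status.zip next_moves).foldl
      (fun d sm => d.modify sm.1 [] (· ++ [sm.2])) PySem.Dict.empty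
  if next_player == 1 then
    let score : PySem.Dict String Int :=
      PySem.Dict.ofList [("player_one_always_win", 2), ("tie", 1), ("player_two_always_win", 0)]
    let best := next_boards_status.foldl
      (fun acc s => let sc := score.getD s (-1); if sc > acc.2 then (s, sc) else acc)
      ("player_two_always_win", (0 : Int))
    (best.1, buckets.getD best.1 [])
  else if next_player == 2 then
    let score : PySem.Dict String Int :=
      PySem.Dict.ofList [("player_two_always_win", 2), ("tie", 1), ("player_one_always_win", 0)]
    let best := next_boards_status.foldl
      (fun acc s => let sc := score.getD s (-1); if sc > acc.2 then (s, sc) else acc)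
      ("player_one_always_win", (0 : Int))
    (best.1, buckets.getD best.1 [])
  else
    ("invalid", buckets.getD "invalid" [])

-- ===== PRECONDITION & SPEC =====
-- A indexes next_boards_status at every position of next_moves, so it raises
-- IndexError whenever next_moves is longer than next_boards_status.
def Pre_get_best_state (next_player : Int) (next_boards_status : List String) (next_moves : List String) : Prop :=
  next_moves.length ≤ next_boards_status.length
instance (next_player : Int) (next_boards_status : List String) (next_moves : List String) : Decidable (Pre_get_best_state next_player next_boards_status next_moves) := by unfold Pre_get_best_state; infer_instance
def pvWitness_get_best_state : Int × List String × List String := (1, ["tie", "player_two_always_win"], ["m0", "m1"])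

def Spec_get_best_state (next_player : Int) (next_boards_status : List String) (next_moves : List String) (out : String × List String) : Prop := out = get_best_state_alt next_player next_boards_status next_moves
instance (next_player : Int) (next_boards_status : List String) (next_moves : List String) (out : String × List String) : Decidable (Spec_get_best_state next_player next_boards_status next_moves out) := by unfold Spec_get_best_state; infer_instance

-- ===== CLAIM =====
def Claim_equal_get_best_state : Prop := ∀ (next_player : Int) (next_boards_status : List String) (next_moves : List String), Dom_get_best_state next_player next_boards_status next_moves → Pre_get_best_state next_player next_boards_status next_moves → Spec_get_best_state next_player next_boards_status next_moves (get_best_state next_player next_boards_status next_moves)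

-- ===== LEMMAS AND PROOFS =====

-- The index comprehension's (status, move) pairs are exactly the zip, when enough statuses exist.
lemma map_range_pair_eq_zip (st mv : List String) (h : mv.length ≤ st.length) :
    (PySem.List.pyRange 0 (mv.length : Int) 1).map
      (fun i => (PySem.List.pyGetD st i "", PySem.List.pyGetD mv i "")) = st.zip mv := by
  rw [PySem.List.pyRange_one]
  apply List.ext_getElem
  · simp; omega
  · intro k h1 h2
    simp only [List.length_map, List.length_range] at h1
    have hk : k < mv.length := by omega
    have hk' : k < st.length := by omega
    simp only [List.getElem_map, List.getElem_range]
    simp [List.getElem_zip, PySem.List.pyGetD_natCast, List.getD_eq_getElem?_getD, hk, hk']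

-- A's filter over indices equals the bucket for best, via the grouping loop.
lemma strategy_eq_bucket (st mv : List String) (best : String) (h : mv.length ≤ st.length) :
    (PySem.List.pyRange 0 (mv.length : Int) 1).foldl
      (fun acc i => if PySem.List.pyGetD st i "" = best then acc ++ [PySem.List.pyGetD mv i ""] else acc) [] =
    ((st.zip mv).foldl (fun d sm => d.modify sm.1 [] (· ++ [sm.2]))
      (PySem.Dict.empty : PySem.Dict String (List String))).getD best [] := by
  have h1 : (PySem.List.pyRange 0 (mv.length : Int) 1).foldl
      (fun acc i => if PySem.List.pyGetD st i "" = best then acc ++ [PySem.List.pyGetD mv i ""] else acc) [] =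
      (st.zip mv).foldl (fun acc p => if ((p.1 == best) = true) then acc ++ [p.2] else acc) ([] : List String) := by
    rw [← map_range_pair_eq_zip st mv h, List.foldl_map]
    simp only [beq_iff_eq]
  rw [h1, PySem.List.foldl_append_if (fun p => p.1 == best) (fun p : String × String => p.2),
    PySem.Dict.getD_foldl_modify_append, PySem.Dict.getD_empty]

-- Score as an if-chain over literal strings: w scores 2, "tie" 1, l 0, others -1.
def sfun (w l : String) (s : String) : Int :=
  if s = w then 2 else if s = "tie" then 1 else if s = l then 0 else -1

lemma score1_eq (s : String) :
    (PySem.Dict.ofList [("player_one_always_win", (2:Int)), ("tie", 1), ("player_two_always_win", 0)]).getD s (-1)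
      = sfun "player_one_always_win" "player_two_always_win" s := by
  simp only [PySem.Dict.ofList, PySem.Dict.update, PySem.Dict.empty, List.foldl,
    PySem.Dict.getD_insert, sfun]
  split_ifs <;> first | rfl | simp_all

lemma score2_eq (s : String) :
    (PySem.Dict.ofList [("player_two_always_win", (2:Int)), ("tie", 1), ("player_one_always_win", 0)]).getD s (-1)
      = sfun "player_two_always_win" "player_one_always_win" s := by
  simp only [PySem.Dict.ofList, PySem.Dict.update, PySem.Dict.empty, List.foldl,
    PySem.Dict.getD_insert, sfun]
  split_ifs <;> first | rfl | simp_all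

-- The scan step used by B (with score already in if-chain form).
def gstep (w l : String) (acc : String × Int) (s : String) : String × Int :=
  let sc := sfun w l s; if sc > acc.2 then (s, sc) else acc

lemma sfun_le_two (w l s : String) : sfun w l s ≤ 2 := by
  unfold sfun; split_ifs <;> omega

lemma gstep_top (w l s : String) : gstep w l (w, 2) s = (w, 2) := by
  unfold gstep
  simp only [if_neg (by have := sfun_le_two w l s; omega : ¬ sfun w l s > (w, (2:Int)).2)]

lemma gstep_mid_eq (w l s : String) (hs : s = w) : gstep w l ("tie", 1) s = (w, 2) := by
  subst hs; unfold gstep sfun; simp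

lemma gstep_mid_ne (w l s : String) (hs : s ≠ w) : gstep w l ("tie", 1) s = ("tie", 1) := by
  unfold gstep sfun; split_ifs <;> simp_all

lemma gstep_low_eq (w l s : String) (hs : s = w) : gstep w l (l, 0) s = (w, 2) := by
  subst hs; unfold gstep sfun; simp

lemma gstep_low_tie (w l : String) (hw : w ≠ "tie") : gstep w l (l, 0) "tie" = ("tie", 1) := by
  unfold gstep sfun; simp [Ne.symm hw]

lemma gstep_low_ne (w l s : String) (hs : s ≠ w) (ht : s ≠ "tie") : gstep w l (l, 0) s = (l, 0) := by
  unfold gstep sfun; split_ifs <;> simp_all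

lemma scan_top (w l : String) (st : List String) :
    st.foldl (gstep w l) (w, 2) = (w, 2) := by
  induction st with
  | nil => rfl
  | cons s st ih => simp only [List.foldl_cons, gstep_top, ih]

lemma scan_mid (w l : String) (st : List String) :
    st.foldl (gstep w l) ("tie", 1) = if w ∈ st then (w, 2) else ("tie", 1) := by
  induction st with
  | nil => simp
  | cons s st ih =>
    by_cases hs : s = w
    · simp only [List.foldl_cons, gstep_mid_eq w l s hs, scan_top]
      simp [hs]
    · simp only [List.foldl_cons, gstep_mid_ne w l s hs, ih]
      simp [Ne.symm hs]

lemma scan_low (w l : String) (st : List String) (hw : w ≠ "tie") :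
    st.foldl (gstep w l) (l, 0) =
      if w ∈ st then (w, 2) else if "tie" ∈ st then ("tie", 1) else (l, 0) := by
  induction st with
  | nil => simp
  | cons s st ih =>
    by_cases hs : s = w
    · simp only [List.foldl_cons, gstep_low_eq w l s hs, scan_top]
      simp [hs]
    · by_cases ht : s = "tie"
      · subst ht
        simp only [List.foldl_cons, gstep_low_tie w l hw, scan_mid]
        by_cases hm : w ∈ st <;> simp [hm, Ne.symm hs]
      · simp only [List.foldl_cons, gstep_low_ne w l s hs ht, ih]
        by_cases hm : w ∈ st <;> simp [hm, Ne.symm hs, Ne.symm ht]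

-- ===== VERDICT =====
theorem get_best_state_spec : Claim_equal_get_best_state := by
  intro p st mv _ hpre
  unfold Spec_get_best_state get_best_state get_best_state_alt
  by_cases h1 : p = 1
  · subst h1
    simp only [beq_self_eq_true, if_true]
    have hfold : st.foldl
        (fun acc s => let sc := (PySem.Dict.ofList [("player_one_always_win", (2:Int)), ("tie", 1), ("player_two_always_win", 0)]).getD s (-1); if sc > acc.2 then (s, sc) else acc)
        ("player_two_always_win", (0:Int)) = st.foldl (gstep "player_one_always_win" "player_two_always_win") ("player_two_always_win", 0) := by
      simp only [score1_eq]; rfl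
    rw [hfold, scan_low _ _ st (by decide)]
    by_cases a : "player_one_always_win" ∈ st <;> by_cases b : "tie" ∈ st <;>
      simp [a, b, strategy_eq_bucket st mv _ hpre]
  · by_cases h2 : p = 2
    · subst h2
      have e1 : ((2:Int) == 1) = false := by decide
      simp only [e1, Bool.false_eq_true, if_false, beq_self_eq_true, if_true]
      have hfold : st.foldl
          (fun acc s => let sc := (PySem.Dict.ofList [("player_two_always_win", (2:Int)), ("tie", 1), ("player_one_always_win", 0)]).getD s (-1); if sc > acc.2 then (s, sc) else acc)
          ("player_one_always_win", (0:Int)) = st.foldl (gstep "player_two_always_win" "player_one_always_win") ("player_one_always_win", 0) := by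
        simp only [score2_eq]; rfl
      rw [hfold, scan_low _ _ st (by decide)]
      by_cases a : "player_two_always_win" ∈ st <;> by_cases b : "tie" ∈ st <;>
        simp [a, b, strategy_eq_bucket st mv _ hpre]
    · have e1 : (p == 1) = false := by simp [h1]
      have e2 : (p == 2) = false := by simp [h2]
      simp [e1, e2, strategy_eq_bucket st mv _ hpre]
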